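-- pv_equiv track=rewrite | github.com/artachobruno/Athlete-Space---Backend | scripts/backfill_attach_activities_to_workouts.py | sport_types_match
-- ===== SOURCE A (Python) =====
-- def sport_types_match(activity_type: str | None, planned_type: str | None) -> bool:
--     """Check if activity and planned session types match.
--
--     Handles case-insensitive matching and common variations.
--     Based on app/calendar/reconciliation.py _types_match function.
--
--     Args:
--         activity_type: Activity type (e.g., "run", "ride")
--         planned_type: Planned session type (e.g., "Run", "Bike")
--
--     Returns:
--         True if types match, False otherwise
--     """
--     if not activity_type or not planned_type:
--         return False
--
--     planned_lower = planned_type.lower().strip()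
--     activity_lower = activity_type.lower().strip()
--
--     # Exact match
--     if planned_lower == activity_lower:
--         return True
--
--     # Common variations grouped by equivalence
--     type_groups: list[list[str]] = [
--         ["run", "running"],
--         ["ride", "bike", "cycling", "virtualride"],
--         ["swim", "swimming"],
--         ["walk", "walking"],
--     ]
--
--     # Check if both types are in the same group
--     return any(planned_lower in group and activity_lower in group for group in type_groups)
-- ===== SOURCE B (Python) =====
-- # Map each non-canonical alias to its canonical sport name; canonical names
-- # and unknown words map to themselves.
-- _ALIAS = {
--     "running": "run",
--     "bike": "ride", "cycling": "ride", "virtualride": "ride",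
--     "swimming": "swim",
--     "walking": "walk",
-- }
--
--
-- def _canonical(s: str) -> str:
--     return _ALIAS.get(s, s)
--
--
-- def sport_types_match(activity_type: str | None, planned_type: str | None) -> bool:
--     """Check if activity and planned session types match (case-insensitive, with aliases)."""
--     if not activity_type or not planned_type:
--         return False
--     return _canonical(planned_type.lower().strip()) == _canonical(activity_type.lower().strip())
-- ===== Notes on version B (the rewrite author's own statement) =====
-- stated objective: simpler
-- what changed: Replaces A's two-stage check (exact equality, then a scan over alias groups testing joint membership) by rewriting each normalized type to a canonical sport name (aliases to their representative, unknown words to themselves) and comparing once; the exact-match branch and the group-membership scan both disappear.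
import Mathlib
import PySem

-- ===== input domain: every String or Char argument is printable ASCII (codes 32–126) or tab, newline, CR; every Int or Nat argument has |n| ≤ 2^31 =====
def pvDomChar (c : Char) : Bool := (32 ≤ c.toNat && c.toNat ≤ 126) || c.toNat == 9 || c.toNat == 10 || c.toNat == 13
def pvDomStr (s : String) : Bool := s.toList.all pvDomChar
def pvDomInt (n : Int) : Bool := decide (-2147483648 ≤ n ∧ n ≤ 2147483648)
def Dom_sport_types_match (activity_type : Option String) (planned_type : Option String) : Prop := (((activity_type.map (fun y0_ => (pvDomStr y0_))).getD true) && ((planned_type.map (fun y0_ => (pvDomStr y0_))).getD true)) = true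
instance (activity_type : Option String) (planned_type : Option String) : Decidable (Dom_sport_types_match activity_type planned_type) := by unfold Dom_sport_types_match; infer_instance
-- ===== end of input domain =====

-- B drops A's exact-match branch and group-membership scan: it rewrites each normalized type to a canonical sport name (alias → representative, unknown → itself) and compares once (simpler).

-- ===== PORT A =====
def sport_types_match (activity_type : Option String) (planned_type : Option String) : Bool :=
  -- `if not activity_type or not planned_type: return False` (None and "" are falsy)
  match activity_type, planned_type with
  | some a, some p =>
    if a == "" || p == "" then false
    else
      let planned_lower := PySem.Str.strip (PySem.Str.lower p)
      let activity_lower := PySem.Str.strip (PySem.Str.lower a)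
      if planned_lower == activity_lower then true
      else
        let type_groups : List (List String) :=
          [["run", "running"],
           ["ride", "bike", "cycling", "virtualride"],
           ["swim", "swimming"],
           ["walk", "walking"]]
        type_groups.any (fun group => group.contains planned_lower && group.contains activity_lower)
  | _, _ => false

-- ===== PORT B =====
-- the module-level dict literal _ALIAS (non-canonical alias → canonical sport name)
def pvAlias : PySem.Dict String String :=
  PySem.Dict.mk
    [("running", "run"),
     ("bike", "ride"), ("cycling", "ride"), ("virtualride", "ride"),
     ("swimming", "swim"),
     ("walking", "walk")]

-- `_canonical(s) = _ALIAS.get(s, s)`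
def pvCanonical (s : String) : String := pvAlias.getD s s

def sport_types_match_alt (activity_type : Option String) (planned_type : Option String) : Bool :=
  match activity_type with
  | none => false
  | some a =>
  match planned_type with
  | none => false
  | some p =>
    if a == "" || p == "" then false
    else
      pvCanonical (PySem.Str.strip (PySem.Str.lower p))
        == pvCanonical (PySem.Str.strip (PySem.Str.lower a))

-- ===== PRECONDITION & SPEC =====
def Spec_sport_types_match (activity_type : Option String) (planned_type : Option String) (out : Bool) : Prop := out = sport_types_match_alt activity_type planned_type
instance (activity_type : Option String) (planned_type : Option String) (out : Bool) : Decidable (Spec_sport_types_match activity_type planned_type out) := by unfold Spec_sport_types_match; infer_instance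

-- ===== CLAIM (what is proved, stated in full; the proofs are below) =====
def Claim_equal_sport_types_match : Prop := ∀ (activity_type : Option String) (planned_type : Option String), Dom_sport_types_match activity_type planned_type → Spec_sport_types_match activity_type planned_type (sport_types_match activity_type planned_type)

-- ===== LEMMAS AND PROOFS =====

-- a word that is none of the six alias keys canonicalizes to itself
theorem pvCanon_unknown (s : String)
    (h : s ∉ (["running", "bike", "cycling", "virtualride", "swimming", "walking"] : List String)) :
    pvCanonical s = s := by
  have hn : pvAlias.get? s = none := by
    rw [PySem.Dict.get?_eq_none_iff_not_mem_keys]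
    simpa [pvAlias, PySem.Dict.keys_mk] using h
  unfold pvCanonical
  rw [PySem.Dict.getD_eq_get?_getD, hn]
  rfl

theorem pvC_run : pvCanonical "run" = "run" := by decide
theorem pvC_running : pvCanonical "running" = "run" := by decide
theorem pvC_ride : pvCanonical "ride" = "ride" := by decide
theorem pvC_bike : pvCanonical "bike" = "ride" := by decide
theorem pvC_cycling : pvCanonical "cycling" = "ride" := by decide
theorem pvC_virtualride : pvCanonical "virtualride" = "ride" := by decide
theorem pvC_swim : pvCanonical "swim" = "swim" := by decide
theorem pvC_swimming : pvCanonical "swimming" = "swim" := by decide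
theorem pvC_walk : pvCanonical "walk" = "walk" := by decide
theorem pvC_walking : pvCanonical "walking" = "walk" := by decide

-- membership in a group of A's scan ↔ canonicalizing to that group's representative
theorem pvG0 (s : String) :
    ((["run", "running"] : List String).contains s) = (pvCanonical s == "run") := by
  by_cases h1 : s = "run"; · subst h1; decide
  by_cases h2 : s = "running"; · subst h2; decide
  by_cases h3 : s = "bike"; · subst h3; decide
  by_cases h4 : s = "cycling"; · subst h4; decide
  by_cases h5 : s = "virtualride"; · subst h5; decide
  by_cases h6 : s = "swimming"; · subst h6; decide
  by_cases h7 : s = "walking"; · subst h7; decide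
  have hc := pvCanon_unknown s (by simp [h2, h3, h4, h5, h6, h7])
  simp [hc, h1, h2]

theorem pvG1 (s : String) :
    ((["ride", "bike", "cycling", "virtualride"] : List String).contains s) = (pvCanonical s == "ride") := by
  by_cases h1 : s = "ride"; · subst h1; decide
  by_cases h2 : s = "running"; · subst h2; decide
  by_cases h3 : s = "bike"; · subst h3; decide
  by_cases h4 : s = "cycling"; · subst h4; decide
  by_cases h5 : s = "virtualride"; · subst h5; decide
  by_cases h6 : s = "swimming"; · subst h6; decide
  by_cases h7 : s = "walking"; · subst h7; decide
  have hc := pvCanon_unknown s (by simp [h2, h3, h4, h5, h6, h7])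
  simp [hc, h1, h3, h4, h5]

theorem pvG2 (s : String) :
    ((["swim", "swimming"] : List String).contains s) = (pvCanonical s == "swim") := by
  by_cases h1 : s = "swim"; · subst h1; decide
  by_cases h2 : s = "running"; · subst h2; decide
  by_cases h3 : s = "bike"; · subst h3; decide
  by_cases h4 : s = "cycling"; · subst h4; decide
  by_cases h5 : s = "virtualride"; · subst h5; decide
  by_cases h6 : s = "swimming"; · subst h6; decide
  by_cases h7 : s = "walking"; · subst h7; decide
  have hc := pvCanon_unknown s (by simp [h2, h3, h4, h5, h6, h7])
  simp [hc, h1, h6]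

theorem pvG3 (s : String) :
    ((["walk", "walking"] : List String).contains s) = (pvCanonical s == "walk") := by
  by_cases h1 : s = "walk"; · subst h1; decide
  by_cases h2 : s = "running"; · subst h2; decide
  by_cases h3 : s = "bike"; · subst h3; decide
  by_cases h4 : s = "cycling"; · subst h4; decide
  by_cases h5 : s = "virtualride"; · subst h5; decide
  by_cases h6 : s = "swimming"; · subst h6; decide
  by_cases h7 : s = "walking"; · subst h7; decide
  have hc := pvCanon_unknown s (by simp [h2, h3, h4, h5, h6, h7])
  simp [hc, h1, h7]

-- core: A's "exact match or same group" equals B's "same canonical form"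
theorem pvMain (pl al : String) :
    (if pl == al then true
     else ([["run", "running"],
            ["ride", "bike", "cycling", "virtualride"],
            ["swim", "swimming"],
            ["walk", "walking"]] : List (List String)).any
             (fun group => group.contains pl && group.contains al))
    = (pvCanonical pl == pvCanonical al) := by
  by_cases heq : pl = al
  · subst heq; simp
  rw [if_neg (by simpa using heq)]
  simp only [List.any_cons, List.any_nil, Bool.or_false, pvG0, pvG1, pvG2, pvG3]
  by_cases h1 : pl = "run"
  · subst h1; rw [pvC_run]
    rcases eq_or_ne (pvCanonical al) "run" with h | h
    · simp [h]
    · simp [h, h.symm]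
  by_cases h2 : pl = "running"
  · subst h2; rw [pvC_running]
    rcases eq_or_ne (pvCanonical al) "run" with h | h
    · simp [h]
    · simp [h, h.symm]
  by_cases h3 : pl = "ride"
  · subst h3; rw [pvC_ride]
    rcases eq_or_ne (pvCanonical al) "ride" with h | h
    · simp [h]
    · simp [h, h.symm]
  by_cases h4 : pl = "bike"
  · subst h4; rw [pvC_bike]
    rcases eq_or_ne (pvCanonical al) "ride" with h | h
    · simp [h]
    · simp [h, h.symm]
  by_cases h5 : pl = "cycling"
  · subst h5; rw [pvC_cycling]
    rcases eq_or_ne (pvCanonical al) "ride" with h | h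
    · simp [h]
    · simp [h, h.symm]
  by_cases h6 : pl = "virtualride"
  · subst h6; rw [pvC_virtualride]
    rcases eq_or_ne (pvCanonical al) "ride" with h | h
    · simp [h]
    · simp [h, h.symm]
  by_cases h7 : pl = "swim"
  · subst h7; rw [pvC_swim]
    rcases eq_or_ne (pvCanonical al) "swim" with h | h
    · simp [h]
    · simp [h, h.symm]
  by_cases h8 : pl = "swimming"
  · subst h8; rw [pvC_swimming]
    rcases eq_or_ne (pvCanonical al) "swim" with h | h
    · simp [h]
    · simp [h, h.symm]
  by_cases h9 : pl = "walk"
  · subst h9; rw [pvC_walk]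
    rcases eq_or_ne (pvCanonical al) "walk" with h | h
    · simp [h]
    · simp [h, h.symm]
  by_cases h10 : pl = "walking"
  · subst h10; rw [pvC_walking]
    rcases eq_or_ne (pvCanonical al) "walk" with h | h
    · simp [h]
    · simp [h, h.symm]
  -- pl is an unknown word: it canonicalizes to itself and matches nothing else
  have hcp : pvCanonical pl = pl := pvCanon_unknown pl (by simp [h2, h4, h5, h6, h8, h10])
  have hr : pl ≠ pvCanonical al := by
    by_cases k2 : al = "running"; · subst k2; rw [pvC_running]; exact h1
    by_cases k4 : al = "bike"; · subst k4; rw [pvC_bike]; exact h3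
    by_cases k5 : al = "cycling"; · subst k5; rw [pvC_cycling]; exact h3
    by_cases k6 : al = "virtualride"; · subst k6; rw [pvC_virtualride]; exact h3
    by_cases k8 : al = "swimming"; · subst k8; rw [pvC_swimming]; exact h7
    by_cases k10 : al = "walking"; · subst k10; rw [pvC_walking]; exact h9
    rw [pvCanon_unknown al (by simp [k2, k4, k5, k6, k8, k10])]
    exact heq
  rw [hcp]
  rw [beq_eq_false_iff_ne.mpr h1, beq_eq_false_iff_ne.mpr h3, beq_eq_false_iff_ne.mpr h7,
      beq_eq_false_iff_ne.mpr h9, beq_eq_false_iff_ne.mpr hr]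
  simp

-- ===== VERDICT (by name: the statement is the Claim_ definition above) =====
theorem sport_types_match_spec : Claim_equal_sport_types_match := by
  intro activity_type planned_type _
  unfold Spec_sport_types_match
  rcases activity_type with _ | a
  · rfl
  rcases planned_type with _ | p
  · rfl
  show (if a == "" || p == "" then false
        else if PySem.Str.strip (PySem.Str.lower p) == PySem.Str.strip (PySem.Str.lower a) then true
        else ([["run", "running"],
               ["ride", "bike", "cycling", "virtualride"],
               ["swim", "swimming"],
               ["walk", "walking"]] : List (List String)).any
                (fun group => group.contains (PySem.Str.strip (PySem.Str.lower p)) &&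
                              group.contains (PySem.Str.strip (PySem.Str.lower a))))
     = (if a == "" || p == "" then false
        else pvCanonical (PySem.Str.strip (PySem.Str.lower p))
              == pvCanonical (PySem.Str.strip (PySem.Str.lower a)))
  by_cases h1 : (a == "" || p == "") = true
  · rw [if_pos h1, if_pos h1]
  · rw [if_neg h1, if_neg h1, pvMain]
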